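-- pv_equiv track=rewrite | github.com/Yinhan-Lu/Arbitrary-Probability-Model | train/blockwise_sampling.py | _find_contiguous_segments
-- ===== SOURCE A (Python) =====
-- def _find_contiguous_segments(positions: list[int]) -> list[list[int]]:
--     """
--     Find contiguous segments in a sorted list of positions.
--
--     Args:
--         positions: Sorted list of positions
--
--     Returns:
--         List of contiguous segments (each segment is a list of consecutive positions)
--     """
--     if not positions:
--         return []
--
--     segments = []
--     current_segment = [positions[0]]
--
--     for i in range(1, len(positions)):
--         if positions[i] == positions[i-1] + 1:
--             # Contiguous
--             current_segment.append(positions[i])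
--         else:
--             # Gap found, start new segment
--             segments.append(current_segment)
--             current_segment = [positions[i]]
--
--     segments.append(current_segment)
--     return segments
-- ===== SOURCE B (Python) =====
-- from itertools import groupby
--
--
-- def _find_contiguous_segments(positions: list[int]) -> list[list[int]]:
--     return [[p for _, p in g]
--             for _, g in groupby(enumerate(positions), key=lambda x: x[1] - x[0])]
-- ===== Notes on version B (the rewrite author's own statement) =====
-- stated objective: idiomatic
-- what changed: Replaced the manual index loop with scan-and-accumulate state by the value-minus-index grouping trick: groupby over enumerate(positions) keyed by p - i, emitting each group's values.
import Mathlib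
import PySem

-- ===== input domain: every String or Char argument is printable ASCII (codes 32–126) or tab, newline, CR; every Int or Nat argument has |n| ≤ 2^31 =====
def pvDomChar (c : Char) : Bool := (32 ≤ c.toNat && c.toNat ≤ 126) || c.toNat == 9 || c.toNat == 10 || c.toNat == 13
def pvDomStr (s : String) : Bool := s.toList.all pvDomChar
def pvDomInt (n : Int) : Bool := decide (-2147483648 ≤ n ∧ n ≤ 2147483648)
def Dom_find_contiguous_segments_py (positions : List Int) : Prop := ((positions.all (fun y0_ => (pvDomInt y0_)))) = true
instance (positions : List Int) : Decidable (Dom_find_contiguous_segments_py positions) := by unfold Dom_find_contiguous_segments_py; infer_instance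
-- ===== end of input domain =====

-- B groups enumerate(positions) with itertools.groupby keyed by value - index instead of A's manual scan; idiomatic, same O(n) cost.

-- ===== PORT A =====
-- A's loop over i in range(1, len) reads positions[i] and positions[i-1]; the fold
-- runs over exactly those adjacent pairs (positions[i], positions[i-1]) with the same
-- state (segments, current_segment).
def find_contiguous_segments_py (positions : List Int) : List (List Int) :=
  match positions with
  | [] => []
  | p0 :: rest =>
    let st := (rest.zip positions).foldl
      (fun (st : List (List Int) × List Int) pr =>
        if pr.1 = pr.2 + 1 then (st.1, st.2 ++ [pr.1]) else (st.1 ++ [st.2], [pr.1]))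
      (([] : List (List Int)), [p0])
    st.1 ++ [st.2]

-- ===== PORT B =====
-- key(x) = x[1] - x[0] on an enumerate pair
def pvKeyB (x : Int × Int) : Int := x.2 - x.1

-- itertools.groupby: runs of equal key, carried as (current run, its key)
def pvGroupByAux (cur : List (Int × Int)) (k : Int) : List (Int × Int) → List (List (Int × Int))
  | [] => [cur]
  | x :: xs => if pvKeyB x = k then pvGroupByAux (cur ++ [x]) k xs
               else cur :: pvGroupByAux [x] (pvKeyB x) xs

def find_contiguous_segments_py_alt (positions : List Int) : List (List Int) :=
  match PySem.List.enumerate positions with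
  | [] => []
  | x :: xs => (pvGroupByAux [x] (pvKeyB x) xs).map (fun g => g.map (fun p => p.2))

-- ===== PRECONDITION & SPEC =====
def Spec_find_contiguous_segments_py (positions : List Int) (out : List (List Int)) : Prop := out = find_contiguous_segments_py_alt positions
instance (positions : List Int) (out : List (List Int)) : Decidable (Spec_find_contiguous_segments_py positions out) := by unfold Spec_find_contiguous_segments_py; infer_instance

-- ===== CLAIM (what is proved, stated in full; the proofs are below) =====
def Claim_equal_find_contiguous_segments_py : Prop := ∀ (positions : List Int), Dom_find_contiguous_segments_py positions → Spec_find_contiguous_segments_py positions (find_contiguous_segments_py positions)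

-- ===== LEMMAS AND PROOFS =====

-- common reference recursion: go prev cur rest
def pvGo (prev : Int) (cur : List Int) : List Int → List (List Int)
  | [] => [cur]
  | q :: qs => if q = prev + 1 then pvGo q (cur ++ [q]) qs else cur :: pvGo q [q] qs

theorem pvA_eq_go (rest : List Int) : ∀ (prev : Int) (acc : List (List Int)) (cur : List Int),
    (let st := (rest.zip (prev :: rest)).foldl
      (fun (st : List (List Int) × List Int) pr =>
        if pr.1 = pr.2 + 1 then (st.1, st.2 ++ [pr.1]) else (st.1 ++ [st.2], [pr.1]))
      (acc, cur)
     st.1 ++ [st.2]) = acc ++ pvGo prev cur rest := by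
  induction rest with
  | nil => intro prev acc cur; simp [pvGo]
  | cons q qs ih =>
    intro prev acc cur
    simp only [List.zip_cons_cons, List.foldl_cons, pvGo]
    by_cases h : q = prev + 1
    · simp only [if_pos h]
      exact ih q acc (cur ++ [q])
    · simp only [if_neg h]
      rw [ih q (acc ++ [cur]) [q]]
      simp

theorem pvB_eq_go (qs : List Int) : ∀ (i prev : Int) (cur : List (Int × Int)),
    (pvGroupByAux cur (prev - (i - 1)) (PySem.List.enumerate qs i)).map (fun g => g.map (fun p => p.2))
      = pvGo prev (cur.map (fun p => p.2)) qs := by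
  induction qs with
  | nil => intro i prev cur; simp [PySem.List.enumerate_nil, pvGroupByAux, pvGo]
  | cons q qs ih =>
    intro i prev cur
    rw [PySem.List.enumerate_cons]
    simp only [pvGroupByAux, pvKeyB, pvGo]
    by_cases h : q = prev + 1
    · have hk : q - i = prev - (i - 1) := by omega
      simp only [if_pos hk, if_pos h]
      have := ih (i + 1) q (cur ++ [(i, q)])
      have harg : q - (i + 1 - 1) = q - i := by ring_nf
      rw [harg] at this
      rw [hk] at this
      rw [this]; simp
    · have hk : ¬ (q - i = prev - (i - 1)) := by omega
      simp only [if_neg hk, if_neg h]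
      have := ih (i + 1) q [(i, q)]
      have harg : q - (i + 1 - 1) = q - i := by ring_nf
      rw [harg] at this
      simp only [List.map_cons, this]
      simp

-- ===== VERDICT (by name: the statement is the Claim_ definition above) =====
theorem find_contiguous_segments_py_spec : Claim_equal_find_contiguous_segments_py := by
  intro positions _
  unfold Spec_find_contiguous_segments_py find_contiguous_segments_py find_contiguous_segments_py_alt
  match positions with
  | [] => simp [PySem.List.enumerate_nil]
  | p0 :: rest =>
    rw [PySem.List.enumerate_cons]
    simp only [zero_add]
    have hB := pvB_eq_go rest 1 p0 [(0, p0)]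
    have h0 : p0 - ((1 : Int) - 1) = p0 - 0 := by ring_nf
    rw [h0] at hB
    have hA := pvA_eq_go rest p0 [] [p0]
    simp only [pvKeyB] at *
    simp only [List.map_cons, List.map_nil] at hB
    rw [hA, hB]
    simp
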